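-- pv_equiv track=rewrite | github.com/pmjoniak/popy | c10/p2.py | wartosciowanie
-- ===== SOURCE A (Python) =====
-- def dict_add(D, k, v):
-- 	D = dict(D)
-- 	D[k] = v
-- 	return D
--
-- def wartosciowanie(Z, moze_zero):
-- 	if len(Z) == 0:
-- 		return [{}]
-- 	Z = list(Z)
-- 	z = Z[0]
-- 	W = wartosciowanie(Z[1:], moze_zero)
-- 	startowe = set('0123456789')
-- 	if not moze_zero[z]:
-- 		startowe = startowe - {'0'}
-- 	res = []
-- 	for w in W:
-- 		wolne = startowe - set(''.join(w.values()))
-- 		for val in wolne: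
-- 			res.append(dict_add(w, z, val))
-- 	return res
-- ===== SOURCE B (Python) =====
-- def wartosciowanie(Z, moze_zero):
-- 	result = [{}]
-- 	for z in reversed(list(Z)):
-- 		startowe = set('0123456789')
-- 		if not moze_zero[z]:
-- 			startowe = startowe - {'0'}
-- 		result = [{**w, z: val}
-- 		          for w in result
-- 		          for val in startowe - set(''.join(w.values()))]
-- 	return result
-- ===== Notes on version B (the rewrite author's own statement) =====
-- stated objective: simpler
-- what changed: Replaces A's recursion with nested append loops by an iterative accumulation: fold over the letters in reversed order, rebuilding the result list with a single flat comprehension instead of recursion plus explicit res.append loops.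
import Mathlib
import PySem

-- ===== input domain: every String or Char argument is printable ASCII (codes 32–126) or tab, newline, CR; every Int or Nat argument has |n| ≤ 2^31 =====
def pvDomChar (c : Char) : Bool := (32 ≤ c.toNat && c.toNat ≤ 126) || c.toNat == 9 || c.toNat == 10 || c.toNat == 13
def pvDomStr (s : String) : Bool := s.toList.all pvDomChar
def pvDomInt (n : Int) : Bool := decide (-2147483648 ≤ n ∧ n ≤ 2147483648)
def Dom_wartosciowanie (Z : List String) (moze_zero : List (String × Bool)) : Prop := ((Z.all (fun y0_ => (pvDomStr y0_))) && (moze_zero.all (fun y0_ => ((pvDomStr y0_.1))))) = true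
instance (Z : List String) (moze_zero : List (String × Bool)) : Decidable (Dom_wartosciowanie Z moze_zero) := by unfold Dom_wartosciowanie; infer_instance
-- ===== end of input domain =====

-- B replaces A's recursion (with explicit nested append loops) by an iterative fold over the
-- reversed letter list using a flat comprehension; same cost, simpler shape.


-- ===== PORT A =====
-- dict_add(D, k, v): copy D, set D[k] = v
def pvDictAdd (D : PySem.Dict String String) (k v : String) : PySem.Dict String String :=
  D.insert k v

-- recursion of A over Z as dicts; `moze_zero[z]` is ported with getD (Pre_ guarantees the key exists)
def wartosciowanieRec (Z : List String) (mz : PySem.Dict String Bool) : List (PySem.Dict String String) :=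
  match Z with
  | [] => [PySem.Dict.empty]
  | z :: rest =>
      let W := wartosciowanieRec rest mz
      let startowe0 : PySem.Set Char := PySem.Set.ofList "0123456789".toList
      let startowe := if !(mz.getD z false) then PySem.Set.diff startowe0 (PySem.Set.ofList ['0']) else startowe0
      W.foldl (fun res w =>
        let wolne := PySem.Set.diff startowe (PySem.Set.ofList (PySem.Str.join "" w.values).toList)
        wolne.foldl (fun res val => res ++ [pvDictAdd w z (String.ofList [val])]) res) []

def wartosciowanie (Z : List String) (moze_zero : List (String × Bool)) : List (List (String × String)) :=
  (wartosciowanieRec Z (PySem.Dict.mk moze_zero)).map (·.items)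

-- ===== PORT B =====
-- one iteration of B's loop body: result = [{**w, z: val} for w in result for val in startowe - used(w)]
def wartosciowanieStep (mz : PySem.Dict String Bool) (result : List (PySem.Dict String String)) (z : String) : List (PySem.Dict String String) :=
  let startowe0 : PySem.Set Char := PySem.Set.ofList "0123456789".toList
  let startowe := if !(mz.getD z false) then PySem.Set.diff startowe0 (PySem.Set.ofList ['0']) else startowe0
  result.flatMap (fun w =>
    (PySem.Set.diff startowe (PySem.Set.ofList (PySem.Str.join "" w.values).toList)).map
      (fun val => w.insert z (String.ofList [val])))

def wartosciowanie_alt (Z : List String) (moze_zero : List (String × Bool)) : List (List (String × String)) :=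
  ((Z.reverse).foldl (wartosciowanieStep (PySem.Dict.mk moze_zero)) [PySem.Dict.empty]).map (·.items)

-- ===== PRECONDITION & SPEC =====
-- Python A evaluates moze_zero[z] for every z in Z and raises KeyError when z is missing,
-- so Pre_ requires every letter of Z to be a key of moze_zero.
def Pre_wartosciowanie (Z : List String) (moze_zero : List (String × Bool)) : Prop :=
  ∀ z ∈ Z, (PySem.Dict.mk moze_zero).contains z = true
instance (Z : List String) (moze_zero : List (String × Bool)) : Decidable (Pre_wartosciowanie Z moze_zero) := by unfold Pre_wartosciowanie; infer_instance
def pvWitness_wartosciowanie : List String × (List (String × Bool)) := (["a", "b"], [("a", true), ("b", false)])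

def Spec_wartosciowanie (Z : List String) (moze_zero : List (String × Bool)) (out : List (List (String × String))) : Prop := out = wartosciowanie_alt Z moze_zero
instance (Z : List String) (moze_zero : List (String × Bool)) (out : List (List (String × String))) : Decidable (Spec_wartosciowanie Z moze_zero out) := by unfold Spec_wartosciowanie; infer_instance

-- ===== CLAIM (what is proved, stated in full; the proofs are below) =====
def Claim_equal_wartosciowanie : Prop := ∀ (Z : List String) (moze_zero : List (String × Bool)), Dom_wartosciowanie Z moze_zero → Pre_wartosciowanie Z moze_zero → Spec_wartosciowanie Z moze_zero (wartosciowanie Z moze_zero)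

-- ===== LEMMAS AND PROOFS =====
-- flattening a list of singletons is a map (used to merge A's innermost append loop)
lemma pv_flatten_map_singleton {α β : Type} (f : α → β) (l : List α) :
    (List.map (fun x => [f x]) l).flatten = List.map f l := by
  induction l with
  | nil => rfl
  | cons x xs ih => simp [ih]

-- one level of A's recursion is exactly one step of B's fold
lemma wartosciowanieRec_cons (z : String) (rest : List String) (mz : PySem.Dict String Bool) :
    wartosciowanieRec (z :: rest) mz = wartosciowanieStep mz (wartosciowanieRec rest mz) z := by
  simp [wartosciowanieRec, wartosciowanieStep, pvDictAdd,
    List.flatMap_def, pv_flatten_map_singleton]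

-- A's recursion equals B's fold over the reversed list
lemma wartosciowanieRec_eq_foldl (Z : List String) (mz : PySem.Dict String Bool) :
    wartosciowanieRec Z mz = (Z.reverse).foldl (wartosciowanieStep mz) [PySem.Dict.empty] := by
  induction Z with
  | nil => rfl
  | cons z rest ih =>
      rw [List.reverse_cons, List.foldl_append, ← ih, wartosciowanieRec_cons]
      rfl

-- ===== VERDICT (by name: the statement is the Claim_ definition above) =====
theorem wartosciowanie_spec : Claim_equal_wartosciowanie := by
  intro Z moze_zero _ _
  unfold Spec_wartosciowanie wartosciowanie wartosciowanie_alt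
  rw [wartosciowanieRec_eq_foldl]
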